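-- pv_equiv track=rewrite | github.com/NexaAI/nexa-sdk | solutions/function-calling/mcp_utils.py | normalize_tool_name
-- ===== SOURCE A (Python) =====
-- from typing import List, Dict, Any, Optional
--
-- def normalize_tool_name(tool_name: str, available_tools: List[Dict[str, Any]]) -> str:
--     """Normalize tool name to match available tools."""
--     # Common name mappings
--     name_mappings = {
--         "create_calendar_event": "create-event",
--         "create-event": "create-event",
--         "list_calendar_events": "list-events",
--         "list-events": "list-events",
--         "update_calendar_event": "update-event",
--         "update-event": "update-event",
--         "delete_calendar_event": "delete-event",
--         "delete-event": "delete-event",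
--         "get_current_time": "get-current-time",
--         "get-current-time": "get-current-time",
--     }
--
--     # First try direct mapping
--     if tool_name in name_mappings:
--         normalized = name_mappings[tool_name]
--         # Verify it exists in available tools
--         tool_names = [t.get("function", {}).get("name", "") for t in available_tools]
--         if normalized in tool_names:
--             return normalized
--
--     # If exact match exists, use it
--     tool_names = [t.get("function", {}).get("name", "") for t in available_tools]
--     if tool_name in tool_names:
--         return tool_name
--
--     # Try fuzzy matching (replace underscores with hyphens)
--     normalized = tool_name.replace("_", "-")
--     if normalized in tool_names:
--         return normalized
--
--     # Return original if no match found
--     return tool_name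
-- ===== SOURCE B (Python) =====
-- def normalize_tool_name(tool_name, available_tools):
--     """Normalize tool name to match available tools."""
--     name_mappings = {
--         "create_calendar_event": "create-event",
--         "create-event": "create-event",
--         "list_calendar_events": "list-events",
--         "list-events": "list-events",
--         "update_calendar_event": "update-event",
--         "update-event": "update-event",
--         "delete_calendar_event": "delete-event",
--         "delete-event": "delete-event",
--         "get_current_time": "get-current-time",
--         "get-current-time": "get-current-time",
--     }
--     mapped = name_mappings.get(tool_name)
--     repl = tool_name.replace("_", "-")
--     # single pass: keep the best (smallest) priority rank any available name achieves
--     best = 3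
--     for t in available_tools:
--         n = t.get("function", {}).get("name", "")
--         if n == mapped:
--             best = min(best, 0)
--         if n == tool_name:
--             best = min(best, 1)
--         if n == repl:
--             best = min(best, 2)
--     if best == 0:
--         return mapped
--     if best == 2:
--         return repl
--     return tool_name
-- ===== Notes on version B (the rewrite author's own statement) =====
-- stated objective: alternative
-- what changed: Instead of testing candidate names against repeatedly rebuilt name lists, B scans available_tools exactly once, scoring each tool's name with a priority rank (0 alias target, 1 exact, 2 underscore-to-hyphen) in an accumulator holding the minimum rank, and picks the result from the final rank.
import Mathlib
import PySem

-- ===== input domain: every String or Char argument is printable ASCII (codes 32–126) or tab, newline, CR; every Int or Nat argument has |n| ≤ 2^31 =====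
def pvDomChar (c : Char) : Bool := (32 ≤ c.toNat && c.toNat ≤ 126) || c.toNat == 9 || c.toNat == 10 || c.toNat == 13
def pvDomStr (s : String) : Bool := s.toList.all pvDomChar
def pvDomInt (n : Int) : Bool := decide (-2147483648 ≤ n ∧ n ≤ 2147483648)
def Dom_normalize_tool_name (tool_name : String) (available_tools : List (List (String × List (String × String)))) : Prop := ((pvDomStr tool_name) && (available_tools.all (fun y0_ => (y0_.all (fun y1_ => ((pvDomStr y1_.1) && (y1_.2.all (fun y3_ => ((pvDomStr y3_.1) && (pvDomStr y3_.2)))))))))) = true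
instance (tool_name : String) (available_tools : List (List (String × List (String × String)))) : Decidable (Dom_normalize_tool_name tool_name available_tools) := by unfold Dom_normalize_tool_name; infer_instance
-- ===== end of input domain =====

-- B replaces A's three candidate-membership branches by a single pass over available_tools keeping the minimum priority rank each name achieves (objective: alternative, single-pass accumulator).


-- ===== PORT A =====
def pvNameMappings : PySem.Dict String String := PySem.Dict.mk
  [("create_calendar_event","create-event"),("create-event","create-event"),
   ("list_calendar_events","list-events"),("list-events","list-events"),
   ("update_calendar_event","update-event"),("update-event","update-event"),
   ("delete_calendar_event","delete-event"),("delete-event","delete-event"),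
   ("get_current_time","get-current-time"),("get-current-time","get-current-time")]

-- t.get("function", {}).get("name", "")
def pvToolName (t : List (String × List (String × String))) : String :=
  PySem.Dict.getD (PySem.Dict.mk ((PySem.Dict.mk t).getD "function" [])) "name" ""

-- [t.get("function", {}).get("name", "") for t in available_tools]
def pvToolNames (available_tools : List (List (String × List (String × String)))) : List String :=
  available_tools.map pvToolName

-- literal transliteration of A: three guard-and-return branches, the tool-name list rebuilt each time
def normalize_tool_name (tool_name : String) (available_tools : List (List (String × List (String × String)))) : String :=
  let rest : String :=
    let tool_names := pvToolNames available_tools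
    if tool_name ∈ tool_names then tool_name
    else
      let normalized := PySem.Str.replace tool_name "_" "-"
      if normalized ∈ tool_names then normalized
      else tool_name
  match pvNameMappings.get? tool_name with
  | some normalized =>
      let tool_names := pvToolNames available_tools
      if normalized ∈ tool_names then normalized else rest
  | none => rest

-- ===== PORT B =====
-- B: one pass over available_tools keeping the minimum priority rank (0 alias target, 1 exact, 2 underscore→hyphen)
def normalize_tool_name_alt (tool_name : String) (available_tools : List (List (String × List (String × String)))) : String :=
  let mapped : Option String := pvNameMappings.get? tool_name
  let repl : String := PySem.Str.replace tool_name "_" "-"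
  let best : Nat := available_tools.foldl (fun b t =>
      let n := pvToolName t
      let b := if some n == mapped then min b 0 else b
      let b := if n == tool_name then min b 1 else b
      if n == repl then min b 2 else b) 3
  if best == 0 then mapped.getD tool_name  -- best = 0 forces mapped = some _, so getD's default is never used
  else if best == 2 then repl
  else tool_name

-- ===== PRECONDITION & SPEC =====
def Spec_normalize_tool_name (tool_name : String) (available_tools : List (List (String × List (String × String)))) (out : String) : Prop := out = normalize_tool_name_alt tool_name available_tools
instance (tool_name : String) (available_tools : List (List (String × List (String × String)))) (out : String) : Decidable (Spec_normalize_tool_name tool_name available_tools out) := by unfold Spec_normalize_tool_name; infer_instance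

-- ===== CLAIM (what is proved, stated in full; the proofs are below) =====
def Claim_equal_normalize_tool_name : Prop := ∀ (tool_name : String) (available_tools : List (List (String × List (String × String)))), Dom_normalize_tool_name tool_name available_tools → Spec_normalize_tool_name tool_name available_tools (normalize_tool_name tool_name available_tools)

-- ===== LEMMAS AND PROOFS =====

-- rank of one available name
def pvRank (mapped : Option String) (tool_name repl n : String) : Nat :=
  if some n == mapped then 0 else if n == tool_name then 1 else if n == repl then 2 else 3

def pvStep (mapped : Option String) (tool_name repl : String) (b : Nat) (n : String) : Nat :=
  let b := if some n == mapped then min b 0 else b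
  let b := if n == tool_name then min b 1 else b
  if n == repl then min b 2 else b

lemma step_eq_min (mapped : Option String) (tool_name repl : String) (b : Nat) (n : String) (hb : b ≤ 3) :
    pvStep mapped tool_name repl b n = min b (pvRank mapped tool_name repl n) := by
  unfold pvStep pvRank
  by_cases h0 : some n == mapped <;> by_cases h1 : n == tool_name <;> by_cases h2 : n == repl <;>
    simp [h0, h1, h2] <;> omega

lemma pvRank_le (mapped : Option String) (tool_name repl n : String) : pvRank mapped tool_name repl n ≤ 3 := by
  unfold pvRank; split_ifs <;> omega

lemma fold_min (mapped : Option String) (tool_name repl : String) :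
    ∀ (xs : List String) (b : Nat), b ≤ 3 →
      xs.foldl (pvStep mapped tool_name repl) b = min b (xs.foldl (pvStep mapped tool_name repl) 3) := by
  intro xs
  induction xs with
  | nil => intro b hb; simp; omega
  | cons n ns ih =>
      intro b hb
      have hr := pvRank_le mapped tool_name repl n
      have h3 : pvStep mapped tool_name repl 3 n = pvRank mapped tool_name repl n := by
        rw [step_eq_min _ _ _ _ _ (le_refl 3)]; omega
      simp only [List.foldl_cons, h3, step_eq_min _ _ _ _ _ hb]
      rw [ih (min b (pvRank mapped tool_name repl n)) (by omega), ih (pvRank mapped tool_name repl n) (by omega)]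
      omega

-- the final rank, characterised by memberships (no alias candidate / alias candidate m)
set_option maxHeartbeats 1000000 in
lemma fold_char_none (tool_name repl : String) (xs : List String) :
    xs.foldl (pvStep none tool_name repl) 3 =
      if tool_name ∈ xs then 1 else if repl ∈ xs then 2 else 3 := by
  induction xs with
  | nil => simp
  | cons n ns ih =>
      have hr := pvRank_le none tool_name repl n
      have h3 : pvStep none tool_name repl 3 n = pvRank none tool_name repl n := by
        rw [step_eq_min _ _ _ _ _ (le_refl 3)]; omega
      rw [List.foldl_cons, h3, fold_min _ _ _ _ _ (by omega), ih]
      have hcT : (tool_name ∈ n :: ns) ↔ (n = tool_name ∨ tool_name ∈ ns) := by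
        rw [List.mem_cons, eq_comm]
      have hcR : (repl ∈ n :: ns) ↔ (n = repl ∨ repl ∈ ns) := by
        rw [List.mem_cons, eq_comm]
      unfold pvRank
      simp only [hcT, hcR, beq_iff_eq, Option.some_ne_none, if_false]
      split_ifs <;> first | omega | simp_all

set_option maxHeartbeats 1000000 in
lemma fold_char_some (m tool_name repl : String) (xs : List String) :
    xs.foldl (pvStep (some m) tool_name repl) 3 =
      if m ∈ xs then 0 else if tool_name ∈ xs then 1 else if repl ∈ xs then 2 else 3 := by
  induction xs with
  | nil => simp
  | cons n ns ih =>
      have hr := pvRank_le (some m) tool_name repl n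
      have h3 : pvStep (some m) tool_name repl 3 n = pvRank (some m) tool_name repl n := by
        rw [step_eq_min _ _ _ _ _ (le_refl 3)]; omega
      rw [List.foldl_cons, h3, fold_min _ _ _ _ _ (by omega), ih]
      have hcM : (m ∈ n :: ns) ↔ (n = m ∨ m ∈ ns) := by
        rw [List.mem_cons, eq_comm]
      have hcT : (tool_name ∈ n :: ns) ↔ (n = tool_name ∨ tool_name ∈ ns) := by
        rw [List.mem_cons, eq_comm]
      have hcR : (repl ∈ n :: ns) ↔ (n = repl ∨ repl ∈ ns) := by
        rw [List.mem_cons, eq_comm]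
      unfold pvRank
      simp only [hcM, hcT, hcR, beq_iff_eq, Option.some.injEq]
      split_ifs <;> first | omega | simp_all

-- ===== VERDICT (by name: the statement is the Claim_ definition above) =====
theorem normalize_tool_name_spec : Claim_equal_normalize_tool_name := by
  intro tool_name available_tools _
  unfold Spec_normalize_tool_name normalize_tool_name normalize_tool_name_alt
  have hfold : ∀ mp : Option String, available_tools.foldl (fun b t =>
      let n := pvToolName t
      let b := if some n == mp then min b 0 else b
      let b := if n == tool_name then min b 1 else b
      if n == PySem.Str.replace tool_name "_" "-" then min b 2 else b) 3
      = (pvToolNames available_tools).foldl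
          (pvStep mp tool_name (PySem.Str.replace tool_name "_" "-")) 3 := by
    intro mp; simp [pvToolNames, List.foldl_map, pvStep]
  cases h : pvNameMappings.get? tool_name with
  | none =>
      simp only [hfold, fold_char_none]
      by_cases h1 : tool_name ∈ pvToolNames available_tools <;>
        by_cases h2 : PySem.Str.replace tool_name "_" "-" ∈ pvToolNames available_tools <;>
        simp [h1, h2]
  | some m =>
      simp only [hfold, fold_char_some]
      by_cases h0 : m ∈ pvToolNames available_tools <;>
        by_cases h1 : tool_name ∈ pvToolNames available_tools <;>
        by_cases h2 : PySem.Str.replace tool_name "_" "-" ∈ pvToolNames available_tools <;>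
        simp [h0, h1, h2]
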